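-- pv_equiv track=rewrite | github.com/lhk6397/Movement-Algorithm-Study | Kimyeojung/[PGS] 음양 더하기.py | solution
-- ===== SOURCE A (Python) =====
-- def solution(absolutes, signs):
--     answer = 0
--     list_si=list(signs)
--     list_ab=list(absolutes)
--
--     for i in range(len(list_ab)):
--         if list_si[i]==True:
--             answer+=list_ab[i]
--         else:
--             answer-=list_ab[i]
--
--     return answer
-- ===== SOURCE B (Python) =====
-- def solution(absolutes, signs):
--     def go(lo, hi):
--         if hi - lo == 0:
--             return 0
--         if hi - lo == 1:
--             return absolutes[lo] if signs[lo] else -absolutes[lo]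
--         mid = (lo + hi) // 2
--         return go(lo, mid) + go(mid, hi)
--     return go(0, len(absolutes))
-- ===== Notes on version B (the rewrite author's own statement) =====
-- stated objective: alternative
-- what changed: B replaces A's linear index loop with an accumulator by divide-and-conquer: it recursively splits the index range at the midpoint, signs the single element at the base case, and adds the two halves' results.
import Mathlib
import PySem

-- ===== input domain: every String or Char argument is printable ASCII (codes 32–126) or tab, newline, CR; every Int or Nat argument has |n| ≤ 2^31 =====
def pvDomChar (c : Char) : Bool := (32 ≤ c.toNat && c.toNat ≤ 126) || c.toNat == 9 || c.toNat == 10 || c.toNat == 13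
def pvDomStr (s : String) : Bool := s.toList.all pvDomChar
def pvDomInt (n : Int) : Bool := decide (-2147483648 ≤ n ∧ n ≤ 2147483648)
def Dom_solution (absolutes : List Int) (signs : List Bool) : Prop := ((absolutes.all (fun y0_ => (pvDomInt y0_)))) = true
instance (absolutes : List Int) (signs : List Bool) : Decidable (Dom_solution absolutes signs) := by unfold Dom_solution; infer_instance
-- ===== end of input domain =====

-- B replaces A's linear index loop with an accumulator by divide-and-conquer over the
-- index range: split at the midpoint, sign the single element at the base case, add the
-- two halves (alternative decomposition, same cost).

-- ===== PORT A =====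
-- answer = 0; for i in range(len(list_ab)): add list_ab[i] if list_si[i]==True else subtract it
def solution (absolutes : List Int) (signs : List Bool) : Int :=
  (PySem.List.pyRange 0 (absolutes.length : Int) 1).foldl
    (fun answer i =>
      if PySem.List.pyGetD signs i false == true then
        answer + PySem.List.pyGetD absolutes i 0
      else
        answer - PySem.List.pyGetD absolutes i 0)
    0

-- ===== PORT B =====
-- def go(lo, hi): if hi-lo == 0: return 0; if hi-lo == 1: return absolutes[lo] if
-- signs[lo] else -absolutes[lo]; mid = (lo+hi)//2; return go(lo, mid) + go(mid, hi)
-- (the first test is '≤ 0' instead of '== 0' only to make the recursion total on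
-- arguments the entry never produces; (lo+hi)//2 is PySem.Int.floordiv)
def pvGoB (a : List Int) (s : List Bool) (lo hi : Int) : Int :=
  if _h0 : hi - lo ≤ 0 then 0
  else if _h1 : hi - lo = 1 then
    (if PySem.List.pyGetD s lo false then PySem.List.pyGetD a lo 0
     else -(PySem.List.pyGetD a lo 0))
  else
    pvGoB a s lo (PySem.Int.floordiv (lo + hi) 2)
      + pvGoB a s (PySem.Int.floordiv (lo + hi) 2) hi
termination_by (hi - lo).toNat
decreasing_by
  all_goals
    rw [PySem.Int.floordiv_eq_ediv_of_pos (by omega : (0:Int) < 2)]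
  all_goals omega

-- return go(0, len(absolutes))
def solution_alt (absolutes : List Int) (signs : List Bool) : Int :=
  pvGoB absolutes signs 0 (absolutes.length : Int)

-- ===== PRECONDITION & SPEC =====
-- Pre_: both programs index signs[i] for every i < len(absolutes); a shorter signs
-- list makes both Pythons raise IndexError, so exactly those inputs are excluded.
def Pre_solution (absolutes : List Int) (signs : List Bool) : Prop :=
  absolutes.length ≤ signs.length
instance (absolutes : List Int) (signs : List Bool) : Decidable (Pre_solution absolutes signs) := by
  unfold Pre_solution; infer_instance
def pvWitness_solution : List Int × List Bool := ([4, 7, 12], [true, false, true])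

def Spec_solution (absolutes : List Int) (signs : List Bool) (out : Int) : Prop := out = solution_alt absolutes signs
instance (absolutes : List Int) (signs : List Bool) (out : Int) : Decidable (Spec_solution absolutes signs out) := by unfold Spec_solution; infer_instance

-- ===== CLAIM (what is proved, stated in full; the proofs are below) =====
def Claim_equal_solution : Prop := ∀ (absolutes : List Int) (signs : List Bool), Dom_solution absolutes signs → Pre_solution absolutes signs → Spec_solution absolutes signs (solution absolutes signs)

-- ===== LEMMAS AND PROOFS =====

-- the per-index signed value both programs are built from
def pvF (a : List Int) (s : List Bool) (i : Int) : Int :=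
  if PySem.List.pyGetD s i false then PySem.List.pyGetD a i 0 else -(PySem.List.pyGetD a i 0)

-- A's loop is the sum of the signed values over range(len(a))
theorem pv_sumA (a : List Int) (s : List Bool) :
    solution a s = ((PySem.List.pyRange 0 (a.length : Int) 1).map (pvF a s)).sum := by
  unfold solution
  have hbody : (fun (answer i : Int) =>
      if PySem.List.pyGetD s i false == true then
        answer + PySem.List.pyGetD a i 0
      else
        answer - PySem.List.pyGetD a i 0) = fun answer i => answer + pvF a s i := by
    funext answer i
    unfold pvF
    by_cases h : PySem.List.pyGetD s i false = true <;> simp [h] <;> ring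
  rw [hbody, PySem.List.foldl_add, zero_add]

-- B's divide-and-conquer over [lo, hi) is the sum of the signed values over that range
theorem pv_goB_sum (a : List Int) (s : List Bool) :
    ∀ (n : ℕ) (lo hi : Int), (hi - lo).toNat = n →
      pvGoB a s lo hi = ((PySem.List.pyRange lo hi 1).map (pvF a s)).sum := by
  intro n
  induction n using Nat.strong_induction_on with
  | _ n ih =>
    intro lo hi hn
    by_cases h0 : hi - lo ≤ 0
    · rw [pvGoB, dif_pos h0, PySem.List.pyRange_one_eq_nil (by omega)]; simp
    · by_cases h1 : hi - lo = 1
      · have hhi : hi = lo + 1 := by omega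
        subst hhi
        rw [pvGoB, dif_neg h0, dif_pos h1, PySem.List.pyRange_one_singleton]
        simp [pvF]
      · rw [pvGoB, dif_neg h0, dif_neg h1,
            PySem.Int.floordiv_eq_ediv_of_pos (by omega : (0:Int) < 2),
            PySem.List.pyRange_one_append lo ((lo + hi) / 2) hi (by omega) (by omega)]
        simp only [List.map_append, List.sum_append]
        rw [ih ((lo + hi) / 2 - lo).toNat (by omega) lo _ rfl,
            ih (hi - (lo + hi) / 2).toNat (by omega) _ hi rfl]

-- ===== VERDICT =====
theorem solution_spec : Claim_equal_solution := by
  intro absolutes signs _ _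
  unfold Spec_solution solution_alt
  rw [pv_sumA, pv_goB_sum absolutes signs ((absolutes.length : Int) - 0).toNat 0 _ rfl]
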